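-- pv_equiv track=rewrite | github.com/subetech/oozie_job_generator | generator/main/postgresql_database.py | _define_partition
-- ===== SOURCE A (Python) =====
-- def _define_partition(fields):
--
--     def find_in_list(some_list, keyword):
--         for l in some_list:
--             if l.find(keyword) != -1:
--                 return l
--         return None
--
--     all_fields = [x[0] for x in fields]
--     in_list = find_in_list(all_fields, "updated")
--     if in_list is not None:
--         return in_list
--     in_list = find_in_list(all_fields, "created")
--     if in_list is not None:
--         return in_list
--     in_list = find_in_list(all_fields, "timestamp")
--     if in_list is not None:
--         return in_list
--     return ""
-- ===== SOURCE B (Python) =====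
-- def _define_partition(fields):
--     upd = cre = ts = None
--     for name, _typ in fields:
--         if upd is None and name.find("updated") != -1:
--             upd = name
--         if cre is None and name.find("created") != -1:
--             cre = name
--         if ts is None and name.find("timestamp") != -1:
--             ts = name
--     if upd is not None:
--         return upd
--     if cre is not None:
--         return cre
--     if ts is not None:
--         return ts
--     return ""
-- ===== Notes on version B (the rewrite author's own statement) =====
-- stated objective: alternative
-- what changed: Replaces three separate scans of the field list (one per keyword) by a single pass that maintains a first-match tracker per keyword and resolves the priority after the loop.
import Mathlib
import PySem

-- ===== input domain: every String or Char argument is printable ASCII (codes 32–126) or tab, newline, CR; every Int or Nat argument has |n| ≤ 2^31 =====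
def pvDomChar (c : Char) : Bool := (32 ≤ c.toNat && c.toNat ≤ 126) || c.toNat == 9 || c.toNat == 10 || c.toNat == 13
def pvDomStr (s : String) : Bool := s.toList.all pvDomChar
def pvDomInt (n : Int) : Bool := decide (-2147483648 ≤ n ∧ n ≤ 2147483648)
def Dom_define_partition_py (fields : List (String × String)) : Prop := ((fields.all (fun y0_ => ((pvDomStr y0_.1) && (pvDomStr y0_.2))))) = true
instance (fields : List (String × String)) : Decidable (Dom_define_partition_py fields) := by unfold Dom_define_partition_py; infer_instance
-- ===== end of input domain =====

-- B replaces A's three separate scans of the field list by one pass keeping a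
-- first-match tracker per keyword, resolved by priority after the loop (alternative, same cost).


-- ===== PORT A =====
def find_in_list (some_list : List String) (keyword : String) : Option String :=
  match some_list with
  | [] => none
  | l :: rest => if PySem.Str.find l keyword ≠ -1 then some l else find_in_list rest keyword

def define_partition_py (fields : List (String × String)) : String :=
  let all_fields := fields.map (fun x => x.1)
  match find_in_list all_fields "updated" with
  | some s => s
  | none =>
    match find_in_list all_fields "created" with
    | some s => s
    | none =>
      match find_in_list all_fields "timestamp" with
      | some s => s
      | none => ""

-- ===== PORT B =====
def dpStep (st : Option String × Option String × Option String) (p : String × String) :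
    Option String × Option String × Option String :=
  ( if st.1 = none ∧ PySem.Str.find p.1 "updated" ≠ -1 then some p.1 else st.1,
    if st.2.1 = none ∧ PySem.Str.find p.1 "created" ≠ -1 then some p.1 else st.2.1,
    if st.2.2 = none ∧ PySem.Str.find p.1 "timestamp" ≠ -1 then some p.1 else st.2.2 )

def define_partition_py_alt (fields : List (String × String)) : String :=
  let st := fields.foldl dpStep (none, none, none)
  match st.1 with
  | some s => s
  | none =>
    match st.2.1 with
    | some s => s
    | none =>
      match st.2.2 with
      | some s => s
      | none => ""

-- ===== PRECONDITION & SPEC =====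
def Spec_define_partition_py (fields : List (String × String)) (out : String) : Prop := out = define_partition_py_alt fields
instance (fields : List (String × String)) (out : String) : Decidable (Spec_define_partition_py fields out) := by unfold Spec_define_partition_py; infer_instance

-- ===== CLAIM (what is proved, stated in full; the proofs are below) =====
def Claim_equal_define_partition_py : Prop := ∀ (fields : List (String × String)), Dom_define_partition_py fields → Spec_define_partition_py fields (define_partition_py fields)

-- ===== LEMMAS AND PROOFS =====

/-- Single-keyword tracker: the fold B runs, projected onto one component. -/
def dpTr (kw : String) (st : Option String) (fields : List (String × String)) : Option String :=
  fields.foldl (fun s p => if s = none ∧ PySem.Str.find p.1 kw ≠ -1 then some p.1 else s) st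

theorem foldl_dpStep (fields : List (String × String))
    (u c t : Option String) :
    fields.foldl dpStep (u, c, t) =
      (dpTr "updated" u fields, dpTr "created" c fields, dpTr "timestamp" t fields) := by
  induction fields generalizing u c t with
  | nil => rfl
  | cons p rest ih => simp only [List.foldl_cons, dpStep, ih, dpTr]

theorem dpTr_some (kw : String) (s : String) (fields : List (String × String)) :
    dpTr kw (some s) fields = some s := by
  induction fields with
  | nil => rfl
  | cons p rest ih => simp [dpTr, List.foldl_cons] at ih ⊢; exact ih

theorem dpTr_none (kw : String) (fields : List (String × String)) :
    dpTr kw none fields = find_in_list (fields.map (fun x => x.1)) kw := by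
  induction fields with
  | nil => rfl
  | cons p rest ih =>
    by_cases h : PySem.Chars.find p.1.toList kw.toList = -1
    · simpa [dpTr, find_in_list, h] using ih
    · simpa [dpTr, find_in_list, h] using dpTr_some kw p.1 rest

-- ===== VERDICT (by name: the statement is the Claim_ definition above) =====
theorem define_partition_py_spec : Claim_equal_define_partition_py := by
  intro fields _
  unfold Spec_define_partition_py define_partition_py define_partition_py_alt
  rw [foldl_dpStep, dpTr_none, dpTr_none, dpTr_none]
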